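-- pv_equiv track=rewrite | github.com/yhr0864/backbone_proxyless | general_functions/prune_utils.py | pack_filter_para
-- ===== SOURCE A (Python) =====
-- def pack_filter_para(start, end, num_filters):
--     para = [[] for i in range(end-start+1)]
--     for i in num_filters:
--         if start <= i[0] <= end:
--             para[i[0]-start].append(i[1])
--     for i in para:
--         if len(i) == 0:
--             i.append(None)
--     return para
-- ===== SOURCE B (Python) =====
-- def pack_filter_para(start, end, num_filters):
--     return [[v for k, v in num_filters if k == p] or [None]
--             for p in range(start, end + 1)]
-- ===== Notes on version B (the rewrite author's own statement) =====
-- stated objective: simpler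
-- what changed: Replaces A's preallocated positional list mutated by a data-driven bucketing pass plus a separate empty-slot patch loop with a single range-driven comprehension that, for each position p, scans num_filters for values keyed p (falling back to [None]); traversal is position-driven nested scans instead of one bucketing pass.
import Mathlib
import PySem

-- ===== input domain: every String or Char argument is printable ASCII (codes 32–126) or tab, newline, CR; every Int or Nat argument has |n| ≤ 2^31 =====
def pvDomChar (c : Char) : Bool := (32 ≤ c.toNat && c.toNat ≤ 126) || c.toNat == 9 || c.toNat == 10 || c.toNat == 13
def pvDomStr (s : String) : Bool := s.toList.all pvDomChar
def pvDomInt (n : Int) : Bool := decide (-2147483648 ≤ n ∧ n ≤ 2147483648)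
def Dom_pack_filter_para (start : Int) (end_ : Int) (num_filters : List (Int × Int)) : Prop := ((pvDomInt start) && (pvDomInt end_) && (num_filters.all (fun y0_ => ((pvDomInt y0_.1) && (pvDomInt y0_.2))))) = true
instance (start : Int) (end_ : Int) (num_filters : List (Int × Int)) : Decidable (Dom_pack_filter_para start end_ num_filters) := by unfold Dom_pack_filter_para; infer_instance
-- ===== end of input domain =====

-- B replaces A's preallocated positional list (mutated by a data-driven bucketing pass, then
-- patched by a second empty-slot loop) with a single position-driven comprehension over the
-- range, each position scanning num_filters for its own values (objective: simpler, not faster).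

-- ===== PORT A =====
-- the guarded index (i.1 - start).toNat is in range, so getD/set hit the cell Python mutates
def pack_filter_para (start : Int) (end_ : Int) (num_filters : List (Int × Int)) : List (List (Option Int)) :=
  let para0 : List (List (Option Int)) := (List.range (end_ - start + 1).toNat).map (fun _ => [])
  let para := num_filters.foldl (fun para i =>
    if start ≤ i.1 ∧ i.1 ≤ end_ then
      para.set (i.1 - start).toNat (para.getD (i.1 - start).toNat [] ++ [some i.2])
    else para) para0
  para.map (fun l => if l.length = 0 then [none] else l)

-- ===== PORT B =====
-- Python '[v for k, v in num_filters if k == p] or [None]': empty-list fallback ported as the if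
def pack_filter_para_alt (start : Int) (end_ : Int) (num_filters : List (Int × Int)) : List (List (Option Int)) :=
  (PySem.List.pyRange start (end_ + 1) 1).map (fun p =>
    let b := (num_filters.filter (fun i => i.1 == p)).map (fun i => some i.2)
    if b = [] then [none] else b)

-- ===== PRECONDITION & SPEC =====
def Spec_pack_filter_para (start : Int) (end_ : Int) (num_filters : List (Int × Int)) (out : List (List (Option Int))) : Prop := out = pack_filter_para_alt start end_ num_filters
instance (start : Int) (end_ : Int) (num_filters : List (Int × Int)) (out : List (List (Option Int))) : Decidable (Spec_pack_filter_para start end_ num_filters out) := by unfold Spec_pack_filter_para; infer_instance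

-- ===== CLAIM (what is proved, stated in full; the proofs are below) =====
def Claim_equal_pack_filter_para : Prop := ∀ (start : Int) (end_ : Int) (num_filters : List (Int × Int)), Dom_pack_filter_para start end_ num_filters → Spec_pack_filter_para start end_ num_filters (pack_filter_para start end_ num_filters)

-- ===== LEMMAS AND PROOFS =====

-- A's fold appends, cell by cell, exactly the values of the pairs keyed by that cell's position
lemma A_fold_get (start end_ : Int) (l : List (Int × Int)) :
    ∀ (para : List (List (Option Int))), para.length = (end_ - start + 1).toNat →
    ∀ (j : Nat), j < para.length →
      ((l.foldl (fun para i =>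
        if start ≤ i.1 ∧ i.1 ≤ end_ then
          para.set (i.1 - start).toNat (para.getD (i.1 - start).toNat [] ++ [some i.2])
        else para) para)[j]?) = (para[j]?).map (· ++ (l.filter (fun i => i.1 == start + (j : Int))).map (fun i => some i.2)) := by
  induction l with
  | nil => intro para h j hj; simp
  | cons i l ih =>
    intro para h j hj
    simp only [List.foldl_cons, List.filter_cons]
    by_cases hin : start ≤ i.1 ∧ i.1 ≤ end_
    · rw [if_pos hin]
      have hm : (i.1 - start).toNat < para.length := by rw [h]; omega
      rw [ih _ (by simpa using h) j (by simpa using hj)]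
      by_cases hmj : (i.1 - start).toNat = j
      · have hkey : (i.1 == start + (j : Int)) = true := by
          simp only [beq_iff_eq]; omega
        rw [hkey, if_pos rfl, hmj, List.getElem?_set_self (by omega),
          List.getElem?_eq_getElem hj]
        simp [List.getD, List.getElem?_eq_getElem hj]
      · have hkey : (i.1 == start + (j : Int)) = false := by
          simp only [beq_eq_false_iff_ne]; intro he; omega
        rw [hkey, List.getElem?_set_ne hmj]
        simp
    · rw [if_neg hin]
      have hle : start + (j : Int) ≤ end_ := by rw [h] at hj; omega
      have hkey : (i.1 == start + (j : Int)) = false := by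
        simp only [beq_eq_false_iff_ne]; intro he; exact hin ⟨by omega, by omega⟩
      rw [hkey]
      simp only [if_neg (by simp : ¬ (false = true))]
      exact ih para h j hj

-- A's fold never changes the length of the positional list
lemma A_fold_len (start end_ : Int) (l : List (Int × Int)) (para : List (List (Option Int))) :
    (l.foldl (fun para i =>
        if start ≤ i.1 ∧ i.1 ≤ end_ then
          para.set (i.1 - start).toNat (para.getD (i.1 - start).toNat [] ++ [some i.2])
        else para) para).length = para.length := by
  induction l generalizing para with
  | nil => rfl
  | cons i l ih =>
    rw [List.foldl_cons, ih]
    split_ifs <;> simp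

-- ===== VERDICT (by name: the statement is the Claim_ definition above) =====
theorem pack_filter_para_spec : Claim_equal_pack_filter_para := by
  intro start end_ nf _
  unfold Spec_pack_filter_para pack_filter_para pack_filter_para_alt
  rw [PySem.List.pyRange_one]
  have hn : (end_ + 1 - start).toNat = (end_ - start + 1).toNat := by omega
  rw [hn]
  have h0 : ((List.range (end_ - start + 1).toNat).map (fun _ => ([] : List (Option Int)))).length = (end_ - start + 1).toNat := by simp
  apply List.ext_getElem?
  intro j
  by_cases hj : j < (end_ - start + 1).toNat
  · rw [List.getElem?_map, A_fold_get start end_ nf _ h0 j (by simpa using hj)]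
    simp [hj, List.length_eq_zero_iff]
  · rw [List.getElem?_map, List.getElem?_map, List.getElem?_eq_none, List.getElem?_eq_none]
    · simp
    · simpa using Nat.not_lt.mp hj
    · rw [A_fold_len, h0]; exact Nat.not_lt.mp hj
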